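-- pv_equiv track=rewrite | github.com/julkesz/thesis_project | src/python_utilities/calculate_statistics.py | calculate_material_changes
-- ===== SOURCE A (Python) =====
-- def calculate_material_changes(data):
--     """Calculate the number of material changes for the given printer's schedule."""
--     previous_material = None
--     material_changes = 0
--
--     for timeslot in data["schedule"]:
--         current_material = timeslot["tasks"][0]["material"] if timeslot["tasks"] else None
--
--         if previous_material is not None and current_material != previous_material:
--             material_changes += 1
--
--         previous_material = current_material
--
--     return material_changes
-- ===== SOURCE B (Python) =====
-- def calculate_material_changes(data):
--     """Calculate the number of material changes for the given printer's schedule."""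
--     # Run-length-compress the per-timeslot materials into group keys; every
--     # group boundary is one candidate change, and it counts iff the left
--     # group's key is a real material (not None).  So the answer is the number
--     # of non-None keys among all groups except the last.
--     keys = []
--     for timeslot in data["schedule"]:
--         m = timeslot["tasks"][0]["material"] if timeslot["tasks"] else None
--         if not keys or keys[-1] != m:
--             keys.append(m)
--     return sum(1 for k in keys[:-1] if k is not None)
-- ===== Notes on version B (the rewrite author's own statement) =====
-- stated objective: alternative
-- what changed: Instead of counting changes with a running previous-material variable, B run-length-compresses the material sequence into a list of group keys and returns the number of non-None keys among all groups but the last (each group boundary is one change, counted iff the left group's material is not None).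
import Mathlib
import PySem

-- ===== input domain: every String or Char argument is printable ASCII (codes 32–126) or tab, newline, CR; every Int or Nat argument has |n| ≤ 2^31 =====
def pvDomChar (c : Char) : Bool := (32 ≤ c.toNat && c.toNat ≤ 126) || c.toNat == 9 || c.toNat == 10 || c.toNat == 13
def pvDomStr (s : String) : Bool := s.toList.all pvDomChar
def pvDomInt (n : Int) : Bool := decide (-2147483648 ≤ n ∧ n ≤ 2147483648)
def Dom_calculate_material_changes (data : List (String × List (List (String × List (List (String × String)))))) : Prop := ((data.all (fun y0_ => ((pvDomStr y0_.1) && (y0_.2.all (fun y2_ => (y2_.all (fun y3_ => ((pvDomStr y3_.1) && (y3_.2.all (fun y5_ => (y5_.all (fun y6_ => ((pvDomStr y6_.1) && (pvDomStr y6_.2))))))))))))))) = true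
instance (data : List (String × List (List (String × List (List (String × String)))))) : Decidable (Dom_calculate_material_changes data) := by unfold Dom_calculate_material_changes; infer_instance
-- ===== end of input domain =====

-- B replaces A's running-previous change counter by run-length compression:
-- it builds the list of material group keys and counts the non-None keys
-- among all groups but the last (objective: alternative).

-- shared helper: `timeslot["tasks"][0]["material"] if timeslot["tasks"] else None`
-- (the same expression occurs verbatim in both Pythons); dict lookup = first match.
def pvMatOf (ts : List (String × List (List (String × String)))) : Option String :=
  match ((PySem.Dict.mk ts).get? "tasks").getD [] with
  | [] => none
  | t :: _ => (PySem.Dict.mk t).get? "material"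

-- ===== PORT A =====
-- running (previous_material, material_changes) state over the schedule
def calculate_material_changes (data : List (String × List (List (String × List (List (String × String)))))) : Int :=
  let sched := ((PySem.Dict.mk data).get? "schedule").getD []
  (sched.foldl
    (fun (st : Option String × Int) timeslot =>
      let current := pvMatOf timeslot
      (current, if st.1.isSome && (current != st.1) then st.2 + 1 else st.2))
    (none, 0)).2

-- ===== PORT B =====
-- loop body: `if not keys or keys[-1] != m: keys.append(m)`
-- (`keys.getLast? ≠ some m` is exactly `not keys or keys[-1] != m`)
def pvKeyStep (keys : List (Option String)) (ts : List (String × List (List (String × String)))) :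
    List (Option String) :=
  let m := pvMatOf ts
  if keys.getLast? ≠ some m then keys ++ [m] else keys

-- run-length-compressed group keys, then count non-None keys in keys[:-1]
-- (keys[:-1] = dropLast, exact for the slice [:-1] on any list)
def calculate_material_changes_alt (data : List (String × List (List (String × List (List (String × String)))))) : Int :=
  let sched := ((PySem.Dict.mk data).get? "schedule").getD []
  let keys := sched.foldl pvKeyStep []
  ((keys.dropLast.filter (fun k => k.isSome)).length : Int)

-- ===== PRECONDITION & SPEC =====
-- Pre_ excludes exactly the inputs on which the Python A raises KeyError:
-- a missing "schedule" key, a timeslot without a "tasks" key, or a nonempty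
-- task list whose first task lacks a "material" key.
def Pre_calculate_material_changes (data : List (String × List (List (String × List (List (String × String)))))) : Prop :=
  (PySem.Dict.mk data).contains "schedule" = true ∧
  ∀ ts ∈ ((PySem.Dict.mk data).get? "schedule").getD [],
    (PySem.Dict.mk ts).contains "tasks" = true ∧
    ∀ t ∈ (((PySem.Dict.mk ts).get? "tasks").getD []).take 1,
      (PySem.Dict.mk t).contains "material" = true
instance (data : List (String × List (List (String × List (List (String × String)))))) : Decidable (Pre_calculate_material_changes data) := by unfold Pre_calculate_material_changes; infer_instance

def pvWitness_calculate_material_changes : (List (String × List (List (String × List (List (String × String)))))) :=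
  [("schedule", [[("tasks", [[("material", "PLA")]])], [("tasks", [])]])]

def Spec_calculate_material_changes (data : List (String × List (List (String × List (List (String × String)))))) (out : Int) : Prop := out = calculate_material_changes_alt data
instance (data : List (String × List (List (String × List (List (String × String)))))) (out : Int) : Decidable (Spec_calculate_material_changes data out) := by unfold Spec_calculate_material_changes; infer_instance

-- ===== CLAIM (what is proved, stated in full; the proofs are below) =====
def Claim_equal_calculate_material_changes : Prop := ∀ (data : List (String × List (List (String × List (List (String × String)))))), Dom_calculate_material_changes data → Pre_calculate_material_changes data → Spec_calculate_material_changes data (calculate_material_changes data)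

-- ===== LEMMAS AND PROOFS =====

-- count of material changes starting from a known previous material (A's loop)
def pvCountFrom (prev : Option String) : List (Option String) → Int
  | [] => 0
  | c :: rest => (if prev.isSome && (c != prev) then 1 else 0) + pvCountFrom c rest

lemma pvFold_eq_countFrom (sched : List (List (String × List (List (String × String))))) :
    ∀ (prev : Option String) (acc : Int),
      (sched.foldl
        (fun (st : Option String × Int) timeslot =>
          let current := pvMatOf timeslot
          (current, if st.1.isSome && (current != st.1) then st.2 + 1 else st.2))
        (prev, acc)).2 = acc + pvCountFrom prev (sched.map pvMatOf) := by
  induction sched with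
  | nil => intro prev acc; simp [pvCountFrom]
  | cons ts rest ih =>
    intro prev acc
    simp only [List.foldl_cons, List.map_cons, pvCountFrom, ih]
    split_ifs <;> ring

-- the key-list fold, started from a compressed list ending in `prev`,
-- adds exactly pvCountFrom prev to the non-None count of keys[:-1]
lemma pvKeys_eq_countFrom (sched : List (List (String × List (List (String × String))))) :
    ∀ (K0 : List (Option String)) (prev : Option String),
      (((sched.foldl pvKeyStep (K0 ++ [prev])).dropLast.filter (fun k => k.isSome)).length : Int)
        = ((K0.filter (fun k => k.isSome)).length : Int) + pvCountFrom prev (sched.map pvMatOf) := by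
  induction sched with
  | nil => intro K0 prev; simp [pvCountFrom]
  | cons ts rest ih =>
    intro K0 prev
    simp only [List.foldl_cons, List.map_cons, pvCountFrom, pvKeyStep]
    by_cases h : pvMatOf ts = prev
    · subst h
      simp only [List.getLast?_concat, ne_eq, not_true_eq_false, if_false, ih,
        bne_self_eq_false, Bool.and_false, if_false]
      simp
    · have hb : (pvMatOf ts != prev) = true := by
        simp [bne_iff_ne, h]
      have hne : ¬ (K0 ++ [prev]).getLast? = some (pvMatOf ts) := by
        rw [List.getLast?_concat]
        intro e; exact h (Option.some.inj e).symm
      rw [if_pos hne, ih (K0 ++ [prev]) (pvMatOf ts)]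
      simp only [List.filter_append, List.length_append, hb]
      cases prev <;> simp [List.filter] <;> ring

-- ===== VERDICT (by name: the statement is the Claim_ definition above) =====
theorem calculate_material_changes_spec : Claim_equal_calculate_material_changes := by
  intro data _ _
  unfold Spec_calculate_material_changes calculate_material_changes calculate_material_changes_alt
  dsimp only
  rw [pvFold_eq_countFrom]
  cases hs : ((PySem.Dict.mk data).get? "schedule").getD [] with
  | nil => simp [pvCountFrom]
  | cons ts rest =>
    have h0 : pvKeyStep [] ts = [] ++ [pvMatOf ts] := by
      simp [pvKeyStep]
    simp only [List.foldl_cons, List.map_cons, pvCountFrom, h0,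
      pvKeys_eq_countFrom rest [] (pvMatOf ts)]
    simp
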